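-- pv_equiv track=rewrite | github.com/Nevruq/DUUI-RagBot | src/chunk_data/chunk_java.py | _get_java_header
-- ===== SOURCE A (Python) =====
-- from typing import Dict, List, Optional, Tuple
--
-- def _get_java_header(lines: List[str], max_header_lines: int = 80) -> str:
--     header_lines: List[str] = []
--     for line in lines:
--         stripped = line.strip()
--         if stripped.startswith("package ") or stripped.startswith("import "):
--             header_lines.append(line)
--         elif stripped == "" or stripped.startswith("//") or stripped.startswith("/*") or stripped.startswith("*"):
--             if header_lines:
--                 continue
--         else:
--             break
--         if len(header_lines) >= max_header_lines:
--             break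
--     return "".join(header_lines).strip() + ("\n\n" if header_lines else "")
-- ===== SOURCE B (Python) =====
-- from typing import List
--
--
-- def _collect_header(lines: List[str]) -> List[str]:
--     """Structural recursion on the list: cons the package/import lines of the
--     continuable prefix, stop at the first non-continuable line."""
--     if not lines:
--         return []
--     s = lines[0].strip()
--     if s.startswith("package ") or s.startswith("import "):
--         return [lines[0]] + _collect_header(lines[1:])
--     if s == "" or s.startswith("//") or s.startswith("/*") or s.startswith("*"):
--         return _collect_header(lines[1:])
--     return []
--
--
-- def _get_java_header(lines: List[str], max_header_lines: int = 80) -> str: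
--     kept = _collect_header(lines)[:max_header_lines]
--     return "".join(kept).strip() + ("\n\n" if kept else "")
-- ===== Notes on version B (the rewrite author's own statement) =====
-- stated objective: alternative
-- what changed: Replaces A's imperative accumulator loop with break/continue and an in-loop cap check by a pure structural recursion that cons-builds the header list front-first with no accumulator and no counter, the cap being applied afterwards by a single slice.
-- outside the precondition, e.g. on _get_java_header(['package a;'], 0): A returns 'package a;\n\n', B returns ''; on _get_java_header(['', 'import a;', 'import b;'], -1): A returns '', B returns 'import a;\n\n'
import Mathlib
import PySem

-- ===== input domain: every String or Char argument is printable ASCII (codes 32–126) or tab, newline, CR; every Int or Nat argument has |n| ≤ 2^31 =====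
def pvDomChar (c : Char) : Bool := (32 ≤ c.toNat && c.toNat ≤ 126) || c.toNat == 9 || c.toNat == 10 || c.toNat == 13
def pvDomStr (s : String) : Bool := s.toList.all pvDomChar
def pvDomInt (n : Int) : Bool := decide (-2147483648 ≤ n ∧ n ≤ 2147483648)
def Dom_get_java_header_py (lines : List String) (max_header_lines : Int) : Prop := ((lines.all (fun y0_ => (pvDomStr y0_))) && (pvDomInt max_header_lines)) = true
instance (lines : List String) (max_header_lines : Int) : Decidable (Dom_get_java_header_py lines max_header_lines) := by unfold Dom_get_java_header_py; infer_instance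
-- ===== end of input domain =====

-- B replaces A's imperative accumulator loop (break/continue + in-loop cap check) by a pure
-- structural recursion that cons-builds the header list, the cap applied by one final slice
-- (objective: alternative, same cost).

-- ===== PORT A =====
-- the for-loop of A, with `header_lines` as accumulator; break returns the accumulator
def gjhA_loop (lines : List String) (max_header_lines : Int) (header_lines : List String) : List String :=
  match lines with
  | [] => header_lines
  | line :: rest =>
    let stripped := PySem.Str.strip line
    if PySem.Str.startswith stripped "package " || PySem.Str.startswith stripped "import " then
      let header_lines := header_lines ++ [line]
      if (header_lines.length : Int) ≥ max_header_lines then header_lines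
      else gjhA_loop rest max_header_lines header_lines
    else if stripped == "" || PySem.Str.startswith stripped "//" || PySem.Str.startswith stripped "/*" || PySem.Str.startswith stripped "*" then
      if !header_lines.isEmpty then gjhA_loop rest max_header_lines header_lines   -- `continue`
      else if (header_lines.length : Int) ≥ max_header_lines then header_lines
      else gjhA_loop rest max_header_lines header_lines
    else header_lines

def get_java_header_py (lines : List String) (max_header_lines : Int) : String :=
  let header_lines := gjhA_loop lines max_header_lines []
  PySem.Str.strip (PySem.Str.join "" header_lines) ++ (if header_lines.isEmpty then "" else "\n\n")

-- ===== PORT B =====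
-- _collect_header: structural recursion, cons-building, no accumulator and no counter
def gjhB_collect (lines : List String) : List String :=
  match lines with
  | [] => []
  | line :: rest =>
    let s := PySem.Str.strip line
    if PySem.Str.startswith s "package " || PySem.Str.startswith s "import " then
      [line] ++ gjhB_collect rest
    else if s == "" || PySem.Str.startswith s "//" || PySem.Str.startswith s "/*" || PySem.Str.startswith s "*" then
      gjhB_collect rest
    else []

def get_java_header_py_alt (lines : List String) (max_header_lines : Int) : String :=
  let kept := PySem.List.slice (gjhB_collect lines) none (some max_header_lines)
  PySem.Str.strip (PySem.Str.join "" kept) ++ (if kept.isEmpty then "" else "\n\n")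

-- ===== PRECONDITION & SPEC =====
-- Pre_ excludes non-positive caps, a degenerate corner nobody would specify: there A's cap
-- check (which runs only after an append) still keeps one header line while B's Python
-- slice [:max_header_lines] trims from the end; neither value is the one a caller could want.
def Pre_get_java_header_py (lines : List String) (max_header_lines : Int) : Prop :=
  1 ≤ max_header_lines
instance (lines : List String) (max_header_lines : Int) : Decidable (Pre_get_java_header_py lines max_header_lines) := by unfold Pre_get_java_header_py; infer_instance

def pvWitness_get_java_header_py : List String × Int := (["package a;", "import x.y;", "int x = 1;"], 80)

def Spec_get_java_header_py (lines : List String) (max_header_lines : Int) (out : String) : Prop := out = get_java_header_py_alt lines max_header_lines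
instance (lines : List String) (max_header_lines : Int) (out : String) : Decidable (Spec_get_java_header_py lines max_header_lines out) := by unfold Spec_get_java_header_py; infer_instance

-- ===== CLAIM (what is proved, stated in full; the proofs are below) =====
def Claim_equal_get_java_header_py : Prop := ∀ (lines : List String) (max_header_lines : Int), Dom_get_java_header_py lines max_header_lines → Pre_get_java_header_py lines max_header_lines → Spec_get_java_header_py lines max_header_lines (get_java_header_py lines max_header_lines)

-- ===== LEMMAS AND PROOFS =====

def gjhB_isHeader (line : String) : Bool :=
  let s := PySem.Str.strip line
  PySem.Str.startswith s "package " || PySem.Str.startswith s "import "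

def gjhB_continuable (line : String) : Bool :=
  let s := PySem.Str.strip line
  gjhB_isHeader line || s == "" || PySem.Str.startswith s "//" || PySem.Str.startswith s "/*" || PySem.Str.startswith s "*"

-- B's recursion computes the package/import lines of the continuable prefix
theorem gjhB_collect_eq (lines : List String) :
    gjhB_collect lines = (lines.takeWhile gjhB_continuable).filter gjhB_isHeader := by
  induction lines with
  | nil => simp [gjhB_collect]
  | cons line rest ih =>
    by_cases hh : gjhB_isHeader line = true
    · have hc : gjhB_continuable line = true := by simp [gjhB_continuable, hh]
      have hh' := hh
      simp only [gjhB_isHeader] at hh'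
      rw [List.takeWhile_cons_of_pos hc, List.filter_cons_of_pos hh]
      simp only [gjhB_collect, hh', if_true, ih]
      rfl
    · have hh' : (PySem.Str.startswith (PySem.Str.strip line) "package "
          || PySem.Str.startswith (PySem.Str.strip line) "import ") = false := by
        simpa [gjhB_isHeader] using hh
      by_cases hc : gjhB_continuable line = true
      · have hc' : (PySem.Str.strip line == "" || PySem.Str.startswith (PySem.Str.strip line) "//"
            || PySem.Str.startswith (PySem.Str.strip line) "/*"
            || PySem.Str.startswith (PySem.Str.strip line) "*") = true := by
          simp only [gjhB_continuable, hh] at hc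
          simpa [Bool.or_assoc] using hc
        rw [List.takeWhile_cons_of_pos hc, List.filter_cons_of_neg hh]
        simp only [gjhB_collect, hh', Bool.false_eq_true, if_false, hc', if_true, ih]
      · have hc' : (PySem.Str.strip line == "" || PySem.Str.startswith (PySem.Str.strip line) "//"
            || PySem.Str.startswith (PySem.Str.strip line) "/*"
            || PySem.Str.startswith (PySem.Str.strip line) "*") = false := by
          simp only [gjhB_continuable, hh, Bool.false_or] at hc
          simpa [Bool.or_assoc] using hc
        rw [List.takeWhile_cons_of_neg hc]
        simp only [gjhB_collect, hh', hc', Bool.false_eq_true, if_false, List.filter_nil]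

-- loop invariant: with budget left, A's loop appends the first (max - |acc|)
-- package/import lines of the continuable prefix to the accumulator
theorem gjhA_loop_eq (lines : List String) (m : Int) (acc : List String)
    (h : (acc.length : Int) < m) :
    gjhA_loop lines m acc
      = acc ++ ((lines.takeWhile gjhB_continuable).filter gjhB_isHeader).take (m - acc.length).toNat := by
  induction lines generalizing acc with
  | nil => simp [gjhA_loop]
  | cons line rest ih =>
    by_cases hh : gjhB_isHeader line = true
    · have hc : gjhB_continuable line = true := by simp [gjhB_continuable, hh]
      have hh' := hh
      simp only [gjhB_isHeader] at hh'
      rw [List.takeWhile_cons_of_pos hc, List.filter_cons_of_pos hh]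
      simp only [gjhA_loop, hh', if_true]
      by_cases hb : ((acc ++ [line]).length : Int) ≥ m
      · have hm : m = (acc.length : Int) + 1 := by simp at hb; omega
        have h1 : (m - (acc.length : Int)).toNat = 1 := by omega
        rw [if_pos hb, h1, List.take_succ_cons, List.take_zero]
      · rw [if_neg hb, ih _ (by simpa using lt_of_not_ge hb)]
        have hn : (m - (acc.length : Int)).toNat = ((m - ((acc ++ [line]).length : Int)).toNat) + 1 := by
          simp at hb ⊢; omega
        rw [hn, List.take_succ_cons]
        simp
    · by_cases hc : gjhB_continuable line = true
      · have hc' : (PySem.Str.strip line == "" || PySem.Str.startswith (PySem.Str.strip line) "//"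
            || PySem.Str.startswith (PySem.Str.strip line) "/*"
            || PySem.Str.startswith (PySem.Str.strip line) "*") = true := by
          simp only [gjhB_continuable, hh] at hc
          simpa [Bool.or_assoc] using hc
        have hh' : (PySem.Str.startswith (PySem.Str.strip line) "package "
            || PySem.Str.startswith (PySem.Str.strip line) "import ") = false := by
          simpa [gjhB_isHeader] using hh
        rw [List.takeWhile_cons_of_pos hc, List.filter_cons_of_neg hh]
        simp only [gjhA_loop, hh', Bool.false_eq_true, if_false, hc', if_true]
        by_cases he : acc.isEmpty
        · have h0 : ¬ ((acc.length : Int) ≥ m) := by omega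
          simp only [he, Bool.not_true, Bool.false_eq_true, if_false, h0, if_false]
          exact ih _ h
        · simp only [Bool.not_eq_true] at he
          simp only [he, Bool.not_false, if_true]
          exact ih _ h
      · have hh' : (PySem.Str.startswith (PySem.Str.strip line) "package "
            || PySem.Str.startswith (PySem.Str.strip line) "import ") = false := by
          simpa [gjhB_isHeader] using hh
        have hc' : (PySem.Str.strip line == "" || PySem.Str.startswith (PySem.Str.strip line) "//"
            || PySem.Str.startswith (PySem.Str.strip line) "/*"
            || PySem.Str.startswith (PySem.Str.strip line) "*") = false := by
          simp only [gjhB_continuable, hh, Bool.false_or] at hc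
          simpa [Bool.or_assoc] using hc
        rw [List.takeWhile_cons_of_neg hc]
        simp only [gjhA_loop, hh', hc', Bool.false_eq_true, if_false,
          List.filter_nil, List.take_nil, List.append_nil]

-- ===== VERDICT (by name: the statement is the Claim_ definition above) =====
theorem get_java_header_py_spec : Claim_equal_get_java_header_py := by
  intro lines m _ hpre
  have hm : (1 : Int) ≤ m := hpre
  have h1 : gjhA_loop lines m [] = ((lines.takeWhile gjhB_continuable).filter gjhB_isHeader).take m.toNat := by
    have := gjhA_loop_eq lines m [] (by simpa using lt_of_lt_of_le Int.zero_lt_one hm)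
    simpa using this
  have h2 : PySem.List.slice (gjhB_collect lines) none (some m)
      = ((lines.takeWhile gjhB_continuable).filter gjhB_isHeader).take m.toNat := by
    rw [gjhB_collect_eq]
    exact PySem.List.slice_to _ (by omega)
  show _ = _
  simp only [get_java_header_py, get_java_header_py_alt, h1, h2]
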